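-- pv_equiv track=rewrite | github.com/MichielBaptist/GeSDD | aggregators.py | link_generations
-- ===== SOURCE A (Python) =====
-- def link_generations(points):
--     # Points: [(gen, amount)]
--
--     # graphs: [[(g1, a1), ... (gn, an)], ... [...]]
--     #   -> list of lists
--     #   -> each list is a list of (g, a) tuples where the gn = gm + 1
--     graphs = []
--     current_graph = [points[0]]
--
--     for i in range(1, len(points)):
--         pr_g, _ = current_graph[-1]
--         c_g, c_a = points[i]
--
--         if c_g == pr_g + 1:
--             current_graph += [(c_g, c_a)]
--         else:
--             graphs += [current_graph]
--             current_graph = [(c_g, c_a)]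
--
--     graphs += [current_graph]
--
--     return graphs
-- ===== SOURCE B (Python) =====
-- def link_generations(points):
--     # Cut-index + slicing decomposition: find the run boundaries first, then
--     # slice the original list into the consecutive-generation runs.
--     if not points:
--         return []
--     cuts = [0]
--     for i in range(1, len(points)):
--         if points[i][0] != points[i - 1][0] + 1:
--             cuts.append(i)
--     cuts.append(len(points))
--     return [points[cuts[j]:cuts[j + 1]] for j in range(len(cuts) - 1)]
-- ===== Notes on version B (the rewrite author's own statement) =====
-- stated objective: alternative
-- what changed: B first computes the list of cut indices where consecutiveness breaks and then slices the input at those cuts, instead of A's single pass that accumulates a growing current run and flushes it into the result; B also returns [] on empty input where A raises.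
-- outside the precondition, e.g. on link_generations([]): A raises IndexError, B returns []
import Mathlib
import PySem

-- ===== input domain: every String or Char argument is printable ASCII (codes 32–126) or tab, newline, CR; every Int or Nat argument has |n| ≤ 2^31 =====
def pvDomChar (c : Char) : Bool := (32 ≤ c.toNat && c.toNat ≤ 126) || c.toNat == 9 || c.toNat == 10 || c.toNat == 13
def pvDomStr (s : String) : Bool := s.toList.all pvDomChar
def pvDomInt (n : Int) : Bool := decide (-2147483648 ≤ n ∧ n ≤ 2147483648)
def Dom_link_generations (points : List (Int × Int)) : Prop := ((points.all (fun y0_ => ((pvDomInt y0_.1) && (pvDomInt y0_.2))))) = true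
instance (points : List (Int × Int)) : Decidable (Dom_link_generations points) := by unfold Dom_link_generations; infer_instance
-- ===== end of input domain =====

-- B groups the points by first collecting the cut indices where consecutiveness breaks and then
-- slicing the input list at those cuts, instead of A's single accumulate-and-flush pass;
-- B returns [] on the empty list where A raises IndexError.

-- ===== PORT A =====
-- step of A's for-loop: state = (graphs, current_graph)
def linkStepA (points : List (Int × Int)) (s : List (List (Int × Int)) × List (Int × Int)) (i : Int) :
    List (List (Int × Int)) × List (Int × Int) :=
  let pr := PySem.List.pyGetD s.2 (-1) (0, 0)
  let c := PySem.List.pyGetD points i (0, 0)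
  if c.1 = pr.1 + 1 then (s.1, s.2 ++ [c]) else (s.1 ++ [s.2], [c])

def link_generations (points : List (Int × Int)) : List (List (Int × Int)) :=
  let st := (PySem.List.pyRange 1 (points.length : Int) 1).foldl (linkStepA points)
    ([], [PySem.List.pyGetD points 0 (0, 0)])
  st.1 ++ [st.2]

-- ===== PORT B =====
-- step of B's cut-collecting loop
def linkStepB (points : List (Int × Int)) (cs : List Int) (i : Int) : List Int :=
  if (PySem.List.pyGetD points i (0, 0)).1 ≠ (PySem.List.pyGetD points (i - 1) (0, 0)).1 + 1
  then cs ++ [i] else cs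

def link_generations_alt (points : List (Int × Int)) : List (List (Int × Int)) :=
  if points.isEmpty then []
  else
    let cuts := ((PySem.List.pyRange 1 (points.length : Int) 1).foldl (linkStepB points) [(0 : Int)])
      ++ [(points.length : Int)]
    (PySem.List.pyRange 0 ((cuts.length : Int) - 1) 1).map (fun j =>
      PySem.List.slice points (some (PySem.List.pyGetD cuts j 0)) (some (PySem.List.pyGetD cuts (j + 1) 0)))

-- ===== PRECONDITION & SPEC =====
-- Pre_ excludes exactly the empty list, on which A raises IndexError (points[0]).
def Pre_link_generations (points : List (Int × Int)) : Prop := points ≠ []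
instance (points : List (Int × Int)) : Decidable (Pre_link_generations points) := by unfold Pre_link_generations; infer_instance
def pvWitness_link_generations : (List (Int × Int)) := [(1, 5), (2, 7), (9, 1)]

def Spec_link_generations (points : List (Int × Int)) (out : List (List (Int × Int))) : Prop := out = link_generations_alt points
instance (points : List (Int × Int)) (out : List (List (Int × Int))) : Decidable (Spec_link_generations points out) := by unfold Spec_link_generations; infer_instance

-- ===== CLAIM (what is proved, stated in full; the proofs are below) =====
def Claim_equal_link_generations : Prop := ∀ (points : List (Int × Int)), Dom_link_generations points → Pre_link_generations points → Spec_link_generations points (link_generations points)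

-- ===== LEMMAS AND PROOFS =====

-- the common semantics: runs of consecutive generations, given the current run and its last generation
def runsSpec (cur : List (Int × Int)) (last : Int) : List (Int × Int) → List (List (Int × Int))
  | [] => [cur]
  | q :: rest => if q.1 = last + 1 then runsSpec (cur ++ [q]) q.1 rest else cur :: runsSpec [q] q.1 rest

-- the cut positions (Nat version) after position i, with previous point prev
def midsOfN (i : Nat) (prev : Int × Int) : List (Int × Int) → List Nat
  | [] => []
  | q :: rest => if q.1 = prev.1 + 1 then midsOfN (i + 1) q rest else i :: midsOfN (i + 1) q rest

def intCasts : List Nat → List Int := List.map (fun m : Nat => (m : Int))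

theorem intCasts_nil : intCasts [] = [] := rfl

theorem intCasts_cons (m : Nat) (ms : List Nat) : intCasts (m :: ms) = (m : Int) :: intCasts ms := rfl

-- the chunks of full determined by a start index and the cut positions
def chunksFrom (full : List (Int × Int)) (c : Nat) : List Nat → List (List (Int × Int))
  | [] => [full.drop c]
  | m :: ms => ((full.take m).drop c) :: chunksFrom full m ms

-- A's loop computes runsSpec
theorem A_loop (full : List (Int × Int)) (t : List (Int × Int)) :
    ∀ (pre acc : List _) (cur : List (Int × Int)) (p : Int × Int),
    full = pre ++ t → cur.getLast? = some p →
    (let st := (PySem.List.pyRange (pre.length : Int) (full.length : Int) 1).foldl (linkStepA full) (acc, cur)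
     st.1 ++ [st.2]) = acc ++ runsSpec cur p.1 t := by
  induction t with
  | nil =>
    intro pre acc cur p hfull hlast
    subst hfull
    simp [runsSpec]
  | cons q rest ih =>
    intro pre acc cur p hfull hlast
    subst hfull
    have hlt : (pre.length : Int) < ((pre ++ q :: rest).length : Int) := by simp
    rw [PySem.List.pyRange_one_cons hlt]
    simp only [List.foldl_cons]
    have hget : PySem.List.pyGetD (pre ++ q :: rest) (pre.length : Int) (0, 0) = q := by
      rw [PySem.List.pyGetD_natCast, List.getD, List.getElem?_append_right (Nat.le_refl _)]
      simp
    have hne : cur ≠ [] := by intro h; subst h; simp at hlast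
    have hlastval : PySem.List.pyGetD cur (-1) (0, 0) = p := by
      rw [PySem.List.pyGetD_neg_one cur (0, 0) hne]
      have h2 : some (cur.getLast hne) = some p := (List.getLast?_eq_some_getLast hne).symm.trans hlast
      exact Option.some.inj h2
    rw [show linkStepA (pre ++ q :: rest) (acc, cur) (pre.length : Int)
        = if q.1 = p.1 + 1 then (acc, cur ++ [q]) else (acc ++ [cur], [q]) by
      simp [linkStepA, hget, hlastval]]
    have hcast : (pre.length : Int) + 1 = (((pre ++ [q]).length : Nat) : Int) := by
      push_cast [List.length_append, List.length_singleton]; ring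
    by_cases hq : q.1 = p.1 + 1
    · rw [if_pos hq]
      have hthis := ih (pre ++ [q]) acc (cur ++ [q]) q (by simp) (by simp)
      rw [hcast]
      simp only [runsSpec, if_pos hq]
      simpa using hthis
    · rw [if_neg hq]
      have hthis := ih (pre ++ [q]) (acc ++ [cur]) [q] q (by simp) (by simp)
      rw [hcast]
      simp only [runsSpec, if_neg hq]
      simp only [List.append_assoc, List.singleton_append] at hthis ⊢
      simpa using hthis

-- B's cut loop computes midsOfN (as Ints)
theorem B_cuts (full : List (Int × Int)) (t : List (Int × Int)) :
    ∀ (pre : List (Int × Int)) (prev : Int × Int) (cs : List Int),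
    full = pre ++ prev :: t →
    (PySem.List.pyRange ((pre.length : Int) + 1) (full.length : Int) 1).foldl (linkStepB full) cs
      = cs ++ intCasts (midsOfN (pre.length + 1) prev t) := by
  induction t with
  | nil =>
    intro pre prev cs hfull
    subst hfull
    simp [midsOfN, intCasts_nil]
  | cons q rest ih =>
    intro pre prev cs hfull
    subst hfull
    have hlt : (pre.length : Int) + 1 < (((pre ++ prev :: q :: rest).length : Nat) : Int) := by
      simp
    rw [PySem.List.pyRange_one_cons hlt]
    simp only [List.foldl_cons]
    have hcast : (pre.length : Int) + 1 = (((pre ++ [prev]).length : Nat) : Int) := by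
      push_cast [List.length_append, List.length_singleton]; ring
    have hget : PySem.List.pyGetD (pre ++ prev :: q :: rest) ((pre.length : Int) + 1) (0, 0) = q := by
      rw [hcast, PySem.List.pyGetD_natCast, List.getD,
        List.getElem?_append_right (by simp)]
      simp
    have hprev : PySem.List.pyGetD (pre ++ prev :: q :: rest) ((pre.length : Int) + 1 - 1) (0, 0) = prev := by
      rw [show (pre.length : Int) + 1 - 1 = (pre.length : Int) by ring,
        PySem.List.pyGetD_natCast, List.getD, List.getElem?_append_right (Nat.le_refl _)]
      simp
    rw [show linkStepB (pre ++ prev :: q :: rest) cs ((pre.length : Int) + 1)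
        = if q.1 = prev.1 + 1 then cs else cs ++ [(pre.length : Int) + 1] by
      simp only [linkStepB, hget, hprev, ne_eq, ite_not]]
    have hlen2 : ((pre ++ [prev]).length : Nat) + 1 = pre.length + 1 + 1 := by simp
    by_cases hq : q.1 = prev.1 + 1
    · rw [if_pos hq]
      have hthis := ih (pre ++ [prev]) q cs (by simp)
      rw [hcast, hthis, hlen2]
      simp only [midsOfN, if_pos hq]
    · rw [if_neg hq]
      have hthis := ih (pre ++ [prev]) q (cs ++ [(((pre ++ [prev]).length : Nat) : Int)]) (by simp)
      rw [hcast, hthis, hlen2]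
      simp only [midsOfN, if_neg hq, intCasts_cons]
      rw [← hcast]
      push_cast
      simp

-- runsSpec equals the chunks cut at midsOfN
theorem runs_eq_chunks (full : List (Int × Int)) (t : List (Int × Int)) :
    ∀ (i c : Nat) (prev : Int × Int), full.drop i = t → c ≤ i →
    runsSpec ((full.take i).drop c) prev.1 t = chunksFrom full c (midsOfN i prev t) := by
  induction t with
  | nil =>
    intro i c prev hdrop _
    have hlen : full.length ≤ i := List.drop_eq_nil_iff.mp hdrop
    simp [runsSpec, midsOfN, chunksFrom, List.take_of_length_le hlen]
  | cons q rest ih =>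
    intro i c prev hdrop hci
    have hi : i < full.length := by
      by_contra h
      rw [List.drop_eq_nil_of_le (by omega)] at hdrop
      exact List.cons_ne_nil _ _ hdrop.symm
    have hq? : full[i]? = some q := by
      have h1 := congrArg List.head? hdrop
      rw [List.head?_drop] at h1
      simpa using h1
    have hdrop' : full.drop (i + 1) = rest := by
      have h2 : (full.drop i).drop 1 = rest := by rw [hdrop]; simp
      simpa [List.drop_drop, Nat.add_comm] using h2
    have htake : full.take (i + 1) = full.take i ++ [q] := by
      rw [List.take_add_one, hq?]; rfl
    have hlentake : (full.take i).length = i := by simp [List.length_take]; omega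
    by_cases hc : q.1 = prev.1 + 1
    · have hstep : (full.take i).drop c ++ [q] = (full.take (i + 1)).drop c := by
        rw [htake, List.drop_append_of_le_length (by omega)]
      simp only [runsSpec, midsOfN, if_pos hc]
      rw [hstep]
      exact ih (i + 1) c q hdrop' (by omega)
    · have hsingle : (full.take (i + 1)).drop i = [q] := by
        rw [htake, List.drop_append_of_le_length (by omega),
          List.drop_eq_nil_of_le (by omega)]
        simp
      simp only [runsSpec, midsOfN, if_neg hc]
      rw [chunksFrom, ← ih (i + 1) i q hdrop' (by omega), hsingle]

-- the pyRange-indexed map over consecutive cut pairs is the zip-with-tail map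
theorem map_cut_pairs (f : Int → Int → List (Int × Int)) (cs : List Int) (t : List Int) :
    ∀ (pre : List Int) (x : Int), cs = pre ++ x :: t →
    (PySem.List.pyRange (pre.length : Int) ((cs.length : Int) - 1) 1).map
        (fun j => f (PySem.List.pyGetD cs j 0) (PySem.List.pyGetD cs (j + 1) 0))
      = ((x :: t).zip t).map (fun ab => f ab.1 ab.2) := by
  induction t with
  | nil =>
    intro pre x hcs
    subst hcs
    simp
  | cons y t' ih =>
    intro pre x hcs
    subst hcs
    have hlt : (pre.length : Int) < (((pre ++ x :: y :: t').length : Nat) : Int) - 1 := by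
      simp; omega
    rw [PySem.List.pyRange_one_cons hlt]
    simp only [List.map_cons]
    have hcast : (pre.length : Int) + 1 = (((pre ++ [x]).length : Nat) : Int) := by
      push_cast [List.length_append, List.length_singleton]; ring
    have hx : PySem.List.pyGetD (pre ++ x :: y :: t') (pre.length : Int) 0 = x := by
      rw [PySem.List.pyGetD_natCast, List.getD, List.getElem?_append_right (Nat.le_refl _)]
      simp
    have hy : PySem.List.pyGetD (pre ++ x :: y :: t') ((pre.length : Int) + 1) 0 = y := by
      rw [hcast, PySem.List.pyGetD_natCast, List.getD,
        List.getElem?_append_right (by simp)]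
      simp
    have hthis := ih (pre ++ [x]) y (by simp)
    rw [hx, hy, hcast, hthis]
    simp

-- zipping the cut list and slicing gives chunksFrom
theorem zip_slices_eq_chunks (full : List (Int × Int)) (ms : List Nat) : ∀ (c : Nat),
    ((((c : Nat) : Int) :: (intCasts ms ++ [(full.length : Int)])).zip
        (intCasts ms ++ [(full.length : Int)])).map
      (fun ab => PySem.List.slice full (some ab.1) (some ab.2))
      = chunksFrom full c ms := by
  induction ms with
  | nil =>
    intro c
    simp only [intCasts_nil, List.nil_append, List.zip_cons_cons, List.zip_nil_right,
      List.map_cons, List.map_nil]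
    rw [PySem.List.slice_natCast]
    have htk : (full.drop c).take (full.length - c) = full.drop c :=
      List.take_of_length_le (by simp)
    rw [htk]
    simp [chunksFrom]
  | cons m ms' ih =>
    intro c
    simp only [intCasts_cons, List.cons_append, List.zip_cons_cons, List.map_cons]
    rw [PySem.List.slice_natCast, chunksFrom, ← ih m, List.drop_take]

-- characterisation of port A on a nonempty list
theorem portA_eq (p0 : Int × Int) (t : List (Int × Int)) :
    link_generations (p0 :: t) = runsSpec [p0] p0.1 t := by
  have h := A_loop (p0 :: t) t [p0] [] [p0] p0 (by simp) (by simp)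
  simpa [link_generations, PySem.List.pyGetD_zero_cons] using h

-- characterisation of port B on a nonempty list
theorem portB_eq (p0 : Int × Int) (t : List (Int × Int)) :
    link_generations_alt (p0 :: t) = chunksFrom (p0 :: t) 0 (midsOfN 1 p0 t) := by
  have hcuts : (PySem.List.pyRange 1 (((p0 :: t).length : Int)) 1).foldl (linkStepB (p0 :: t)) [(0 : Int)]
      = [(0 : Int)] ++ intCasts (midsOfN 1 p0 t) := by
    have h := B_cuts (p0 :: t) t [] p0 [(0 : Int)] (by simp)
    simpa using h
  unfold link_generations_alt
  rw [if_neg (by simp)]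
  simp only [hcuts, List.cons_append, List.nil_append]
  have hm := map_cut_pairs (fun a b => PySem.List.slice (p0 :: t) (some a) (some b))
      ((0 : Int) :: (intCasts (midsOfN 1 p0 t) ++ [((p0 :: t).length : Int)]))
      (intCasts (midsOfN 1 p0 t) ++ [((p0 :: t).length : Int)])
      [] 0 (by simp)
  simp only [List.length_nil, Nat.cast_zero] at hm
  rw [hm]
  have hz := zip_slices_eq_chunks (p0 :: t) (midsOfN 1 p0 t) 0
  simpa using hz

-- ===== VERDICT (by name: the statement is the Claim_ definition above) =====
theorem link_generations_spec : Claim_equal_link_generations := by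
  intro points _ hpre
  unfold Spec_link_generations
  match points, hpre with
  | p0 :: t, _ =>
    rw [portA_eq, portB_eq]
    have h := runs_eq_chunks (p0 :: t) t 1 0 p0 (by simp) (by omega)
    simpa using h
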